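-- pv_equiv track=rewrite | github.com/Dloyr/Fac | L1/Semestre_1/Algo/TP/TP_4/Fct_TP_4.py | compte_symbole
-- ===== SOURCE A (Python) =====
-- def compte_symbole(chaine: str)-> int:
--     """
--     Fct qui compte le nombre de symboles autorisés au sein du mdp:
--      -chaine: mdp
--     """
--     compteur = 0
--
--     for c in chaine:
--         if c == "+" or c == "-" or c == "@" or c == "?" or  c == "!" or  c == "*" or c == "$":
--             compteur += 1
--         elif c == '"' or c == "#" or c >= "%" and c <= ")" or c == "'" or c == "." or c == "/" or c >= ":" and c <= ">" or c >= "[" and \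
--           c <= "`" or c >= "{" and c <= "~":
--             return 0
--
--     return compteur
-- ===== SOURCE B (Python) =====
-- ALLOWED = set('+-@?!*$')
--
-- def _forbidden(c):
--     return (c == '"' or c == '#' or '%' <= c <= ')' or c == "'" or c == '.'
--             or c == '/' or ':' <= c <= '>' or '[' <= c <= '`' or '{' <= c <= '~')
--
-- def compte_symbole(chaine: str) -> int:
--     # Two distinct passes: the result is 0 iff any forbidden char occurs anywhere,
--     # otherwise the number of allowed symbols; order of discovery is irrelevant.
--     if any(_forbidden(c) for c in chaine):
--         return 0
--     return sum(1 for c in chaine if c in ALLOWED)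
-- ===== Notes on version B (the rewrite author's own statement) =====
-- stated objective: alternative
-- what changed: Replaces the single interleaved loop (accumulator plus early return on a forbidden char) with two independent whole-string passes: an any-forbidden presence test, then a pure count of allowed symbols.
import Mathlib
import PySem

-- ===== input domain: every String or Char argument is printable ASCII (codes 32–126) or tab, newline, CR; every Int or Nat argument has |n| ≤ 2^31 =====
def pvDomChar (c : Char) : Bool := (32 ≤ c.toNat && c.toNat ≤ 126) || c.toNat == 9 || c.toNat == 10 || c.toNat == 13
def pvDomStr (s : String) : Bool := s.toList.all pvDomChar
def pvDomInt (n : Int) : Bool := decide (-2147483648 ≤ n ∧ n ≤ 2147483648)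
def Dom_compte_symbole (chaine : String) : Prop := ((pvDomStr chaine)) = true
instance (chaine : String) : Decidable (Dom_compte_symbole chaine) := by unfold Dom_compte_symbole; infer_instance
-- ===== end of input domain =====

-- B: two independent passes (any-forbidden test, then a count of allowed symbols)
-- instead of A's single interleaved loop with accumulator and early return; same cost.

-- ===== PORT A =====
-- A's for-loop with early return, as structural recursion over the characters.
def pvLoopA : List Char → Int → Int
  | [], compteur => compteur
  | c :: cs, compteur =>
    if c == '+' || c == '-' || c == '@' || c == '?' || c == '!' || c == '*' || c == '$' then
      pvLoopA cs (compteur + 1)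
    else if c == '"' || c == '#' || ('%' ≤ c && c ≤ ')') || c == '\'' || c == '.' || c == '/' ||
            (':' ≤ c && c ≤ '>') || ('[' ≤ c && c ≤ '`') || ('{' ≤ c && c ≤ '~') then
      0
    else
      pvLoopA cs compteur

def compte_symbole (chaine : String) : Int := pvLoopA chaine.toList 0

-- ===== PORT B =====
-- Source B's _forbidden(c)
def pvForbiddenB (c : Char) : Bool :=
  c == '"' || c == '#' || ('%' ≤ c && c ≤ ')') || c == '\'' || c == '.' || c == '/' ||
  (':' ≤ c && c ≤ '>') || ('[' ≤ c && c ≤ '`') || ('{' ≤ c && c ≤ '~')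

-- Source B's ALLOWED set membership
def pvAllowedB (c : Char) : Bool := "+-@?!*$".toList.contains c

def compte_symbole_alt (chaine : String) : Int :=
  if chaine.toList.any pvForbiddenB then 0
  else (chaine.toList.countP pvAllowedB : Int)

-- ===== PRECONDITION & SPEC =====
def Spec_compte_symbole (chaine : String) (out : Int) : Prop := out = compte_symbole_alt chaine
instance (chaine : String) (out : Int) : Decidable (Spec_compte_symbole chaine out) := by unfold Spec_compte_symbole; infer_instance

-- ===== CLAIM (what is proved, stated in full; the proofs are below) =====
def Claim_equal_compte_symbole : Prop := ∀ (chaine : String), Dom_compte_symbole chaine → Spec_compte_symbole chaine (compte_symbole chaine)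

-- ===== LEMMAS AND PROOFS =====

-- ===== VERDICT (by name: the statement is the Claim_ definition above) =====
theorem pvAllowedB_eq (c : Char) :
    pvAllowedB c = (c == '+' || c == '-' || c == '@' || c == '?' || c == '!' || c == '*' || c == '$') := by
  simp only [pvAllowedB]
  show (['+','-','@','?','!','*','$'].contains c) = _
  simp [Bool.or_assoc, beq_eq_decide]

theorem pvAllowed_forbidden_disjoint (c : Char) (h : pvAllowedB c = true) :
    pvForbiddenB c = false := by
  rw [pvAllowedB_eq] at h
  simp only [Bool.or_eq_true, beq_iff_eq] at h
  rcases h with ((((((h | h) | h) | h) | h) | h) | h) <;> subst h <;> decide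

theorem pvLoopA_eq (l : List Char) (acc : Int) :
    pvLoopA l acc = if l.any pvForbiddenB then 0 else acc + (l.countP pvAllowedB : Int) := by
  induction l generalizing acc with
  | nil => simp [pvLoopA]
  | cons c cs ih =>
    by_cases ha : pvAllowedB c = true
    · have hf : pvForbiddenB c = false := pvAllowed_forbidden_disjoint c ha
      have ha2 : (c == '+' || c == '-' || c == '@' || c == '?' || c == '!' || c == '*' || c == '$') = true := by
        rw [← pvAllowedB_eq]; exact ha
      simp only [pvLoopA, ha2, if_true, ih, List.any_cons, hf, Bool.false_or,
        List.countP_cons, ha, if_true]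
      split
      · rfl
      · push_cast; ring
    · have ha2 : (c == '+' || c == '-' || c == '@' || c == '?' || c == '!' || c == '*' || c == '$') = false := by
        rw [← pvAllowedB_eq]; simpa using ha
      by_cases hf : pvForbiddenB c = true
      · have hf2 : (c == '"' || c == '#' || ('%' ≤ c && c ≤ ')') || c == '\'' || c == '.' || c == '/' ||
            (':' ≤ c && c ≤ '>') || ('[' ≤ c && c ≤ '`') || ('{' ≤ c && c ≤ '~')) = true := hf
        simp [pvLoopA, ha2, hf2, hf]
      · have hf' : pvForbiddenB c = false := by simpa using hf
        have hf2 : (c == '"' || c == '#' || ('%' ≤ c && c ≤ ')') || c == '\'' || c == '.' || c == '/' ||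
            (':' ≤ c && c ≤ '>') || ('[' ≤ c && c ≤ '`') || ('{' ≤ c && c ≤ '~')) = false := hf'
        simp [pvLoopA, ha2, hf2, ih, hf', ha]

theorem compte_symbole_spec : Claim_equal_compte_symbole := by
  intro chaine _
  unfold Spec_compte_symbole compte_symbole compte_symbole_alt
  rw [pvLoopA_eq]
  simp
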